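-- pv_equiv track=rewrite | github.com/TSultanov/flts | harness/mutex/preprocess.py | discover_locks
-- ===== SOURCE A (Python) =====
-- def discover_locks(merged: dict[str, list[dict]]) -> dict[str, str]:
--     """Discover all unique lock names and assign TLA+ constants.
--
--     Returns a mapping from raw lock name to TLA+ constant, e.g.:
--       "book:abc-123"  -> "b1"
--       "trans:eng_fra"  -> "tr1"
--       "dict:eng_fra"   -> "d1"
--     """
--     books: list[str] = []
--     trans: list[str] = []
--     dicts: list[str] = []
--
--     for events in merged.values():
--         for e in events:
--             lock = e.get("lock", "")
--             if lock.startswith("book:") and lock not in books: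
--                 books.append(lock)
--             elif lock.startswith("trans:") and lock not in trans:
--                 trans.append(lock)
--             elif lock.startswith("dict:") and lock not in dicts:
--                 dicts.append(lock)
--
--     mapping = {}
--     for i, b in enumerate(books, 1):
--         mapping[b] = f"b{i}"
--     for i, t in enumerate(trans, 1):
--         mapping[t] = f"tr{i}"
--     for i, d in enumerate(dicts, 1):
--         mapping[d] = f"d{i}"
--
--     return mapping
-- ===== SOURCE B (Python) =====
-- def discover_locks(merged: dict[str, list[dict]]) -> dict[str, str]:
--     """Discover all unique lock names and assign TLA+ constants."""
--     locks = [e.get("lock", "") for events in merged.values() for e in events]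
--
--     def uniq(prefix):
--         return list(dict.fromkeys(l for l in locks if l.startswith(prefix)))
--
--     return {**{b: f"b{i}" for i, b in enumerate(uniq("book:"), 1)},
--             **{t: f"tr{i}" for i, t in enumerate(uniq("trans:"), 1)},
--             **{d: f"d{i}" for i, d in enumerate(uniq("dict:"), 1)}}
-- ===== Notes on version B (the rewrite author's own statement) =====
-- stated objective: idiomatic
-- what changed: Replaces A's stateful nested dedup loop with an elif chain and three enumeration loops by a flat comprehension of all lock names, per-category filter + dict.fromkeys dedup, and three merged dict comprehensions.
import Mathlib
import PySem

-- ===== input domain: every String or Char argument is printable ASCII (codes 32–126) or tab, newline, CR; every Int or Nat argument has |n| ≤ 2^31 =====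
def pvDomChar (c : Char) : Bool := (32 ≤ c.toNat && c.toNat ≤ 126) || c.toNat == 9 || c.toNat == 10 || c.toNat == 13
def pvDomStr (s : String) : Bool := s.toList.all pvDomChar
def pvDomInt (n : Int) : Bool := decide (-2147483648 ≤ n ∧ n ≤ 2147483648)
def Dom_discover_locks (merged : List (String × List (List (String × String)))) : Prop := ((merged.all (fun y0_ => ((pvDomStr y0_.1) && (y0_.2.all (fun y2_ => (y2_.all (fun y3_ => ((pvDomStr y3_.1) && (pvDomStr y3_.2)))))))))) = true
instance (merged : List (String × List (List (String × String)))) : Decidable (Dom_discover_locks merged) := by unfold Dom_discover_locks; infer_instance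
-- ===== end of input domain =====

-- B replaces A's nested dedup loop and three enumeration loops by a flat comprehension,
-- per-category filter + dict.fromkeys dedup, and three merged dict comprehensions (objective: idiomatic).

-- e.get("lock", "")  (shared by both ports)
def pvGetLock (e : List (String × String)) : String :=
  PySem.Dict.getD (PySem.Dict.mk e) "lock" ""

-- ===== PORT A =====
-- the body of A's collection loop (elif chain over the three category lists)
def pvStepA (st : List String × List String × List String) (lock : String) :
    List String × List String × List String :=
  if PySem.Str.startswith lock "book:" && !(st.1.contains lock) then (st.1 ++ [lock], st.2.1, st.2.2)
  else if PySem.Str.startswith lock "trans:" && !(st.2.1.contains lock) then (st.1, st.2.1 ++ [lock], st.2.2)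
  else if PySem.Str.startswith lock "dict:" && !(st.2.2.contains lock) then (st.1, st.2.1, st.2.2 ++ [lock])
  else st

def discover_locks (merged : List (String × List (List (String × String)))) : List (String × String) :=
  let st := merged.foldl (fun st kv =>
      kv.2.foldl (fun st e => pvStepA st (pvGetLock e)) st) ([], [], [])
  let m := (PySem.List.enumerate st.1 1).foldl
      (fun m p => m.insert p.2 ("b" ++ PySem.Int.toStr p.1)) PySem.Dict.empty
  let m := (PySem.List.enumerate st.2.1 1).foldl
      (fun m p => m.insert p.2 ("tr" ++ PySem.Int.toStr p.1)) m
  let m := (PySem.List.enumerate st.2.2 1).foldl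
      (fun m p => m.insert p.2 ("d" ++ PySem.Int.toStr p.1)) m
  m.items

-- ===== PORT B =====
-- locks = [e.get("lock", "") for events in merged.values() for e in events]
def pvLocks (merged : List (String × List (List (String × String)))) : List String :=
  merged.flatMap (fun kv => kv.2.map pvGetLock)

-- uniq(prefix) = list(dict.fromkeys(l for l in locks if l.startswith(prefix)))
def pvUniq (locks : List String) (pre : String) : List String :=
  PySem.List.dedup (locks.filter (fun l => PySem.Str.startswith l pre))

-- {x: f"{tag}{i}" for i, x in enumerate(xs, 1)}
def pvComp (xs : List String) (tag : String) : PySem.Dict String String :=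
  (PySem.List.enumerate xs 1).foldl
    (fun d p => d.insert p.2 (tag ++ PySem.Int.toStr p.1)) PySem.Dict.empty

def discover_locks_alt (merged : List (String × List (List (String × String)))) : List (String × String) :=
  let locks := pvLocks merged
  ((((PySem.Dict.empty.update (pvComp (pvUniq locks "book:") "b").items).update
      (pvComp (pvUniq locks "trans:") "tr").items).update
      (pvComp (pvUniq locks "dict:") "d").items)).items

-- ===== PRECONDITION & SPEC =====
def Spec_discover_locks (merged : List (String × List (List (String × String)))) (out : List (String × String)) : Prop := out = discover_locks_alt merged
instance (merged : List (String × List (List (String × String)))) (out : List (String × String)) : Decidable (Spec_discover_locks merged out) := by unfold Spec_discover_locks; infer_instance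

-- ===== CLAIM (what is proved, stated in full; the proofs are below) =====
def Claim_equal_discover_locks : Prop := ∀ (merged : List (String × List (List (String × String)))), Dom_discover_locks merged → Spec_discover_locks merged (discover_locks merged)

-- ===== LEMMAS AND PROOFS =====

-- two prefixes of the same string share their first character
lemma pv_startswith_head (s p q : List Char)
    (hp : PySem.Chars.startswith s p = true) (hq : PySem.Chars.startswith s q = true) :
    p ≠ [] → q ≠ [] → p.head? = q.head? := by
  intro hpne hqne
  simp only [PySem.Chars.startswith, List.isPrefixOf_iff_prefix] at hp hq
  obtain ⟨t, ht⟩ := hp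
  obtain ⟨u, hu⟩ := hq
  cases p with
  | nil => exact absurd rfl hpne
  | cons a p' =>
    cases q with
    | nil => exact absurd rfl hqne
    | cons b q' =>
      rw [← ht] at hu
      simp only [List.cons_append] at hu
      injection hu with h1 _
      simp [h1]

lemma pv_excl (s : String) (p q : String)
    (hne : p.toList.head? ≠ q.toList.head?) (hp : p.toList ≠ []) (hq : q.toList ≠ [])
    (h : PySem.Str.startswith s p = true) : PySem.Str.startswith s q = false := by
  by_contra hcon
  simp only [Bool.not_eq_false] at hcon
  simp only [PySem.Str.startswith] at h hcon
  exact hne (pv_startswith_head s.toList p.toList q.toList h hcon hp hq)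

-- the body of B's per-category dedup, as a fold step
def pvSel (pre : String) (acc : List String) (l : String) : List String :=
  if PySem.Str.startswith l pre && !(acc.contains l) then acc ++ [l] else acc

lemma pv_step_componentwise (l : String) (b t d : List String) :
    pvStepA (b, t, d) l = (pvSel "book:" b l, pvSel "trans:" t l, pvSel "dict:" d l) := by
  unfold pvStepA pvSel
  by_cases hb : PySem.Str.startswith l "book:" = true
  · have ht : PySem.Str.startswith l "trans:" = false := pv_excl l _ _ (by decide) (by decide) (by decide) hb
    have hd : PySem.Str.startswith l "dict:" = false := pv_excl l _ _ (by decide) (by decide) (by decide) hb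
    simp only [hb, ht, hd]
    by_cases hc : l ∈ b <;> simp [hc]
  · have hb' : PySem.Str.startswith l "book:" = false := by simpa using hb
    by_cases ht : PySem.Str.startswith l "trans:" = true
    · have hd : PySem.Str.startswith l "dict:" = false := pv_excl l _ _ (by decide) (by decide) (by decide) ht
      simp only [hb', ht, hd]
      by_cases hc : l ∈ t <;> simp [hc]
    · have ht' : PySem.Str.startswith l "trans:" = false := by simpa using ht
      by_cases hd : PySem.Str.startswith l "dict:" = true
      · simp only [hb', ht', hd]
        by_cases hc : l ∈ d <;> simp [hc]
      · have hd' : PySem.Str.startswith l "dict:" = false := by simpa using hd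
        simp only [PySem.Str.startswith] at hb' ht' hd'
        have hb2 : PySem.Chars.startswith l.toList ['b','o','o','k',':'] = false := hb'
        have ht2 : PySem.Chars.startswith l.toList ['t','r','a','n','s',':'] = false := ht'
        have hd2 : PySem.Chars.startswith l.toList ['d','i','c','t',':'] = false := hd'
        simp [hb2, ht2, hd2]

lemma pv_fold_componentwise (ls : List String) :
    ∀ b t d, ls.foldl pvStepA (b, t, d) =
      (ls.foldl (pvSel "book:") b, ls.foldl (pvSel "trans:") t, ls.foldl (pvSel "dict:") d) := by
  induction ls with
  | nil => intro b t d; rfl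
  | cons l ls ih =>
    intro b t d
    simp only [List.foldl_cons, pv_step_componentwise]
    exact ih _ _ _

lemma pv_nested_fold (merged : List (String × List (List (String × String)))) :
    ∀ st, merged.foldl (fun st kv => kv.2.foldl (fun st e => pvStepA st (pvGetLock e)) st) st
      = (pvLocks merged).foldl pvStepA st := by
  induction merged with
  | nil => intro st; rfl
  | cons kv rest ih =>
    intro st
    simp only [List.foldl_cons, pvLocks, List.flatMap_cons, List.foldl_append, List.foldl_map]
    exact ih _

lemma pv_sel_eq_dedup (pre : String) (ls : List String) :
    ls.foldl (pvSel pre) [] = PySem.List.dedup (ls.filter (fun l => PySem.Str.startswith l pre)) := by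
  have h1 : PySem.List.dedup (ls.filter (fun l => PySem.Str.startswith l pre))
      = (ls.filter (fun l => PySem.Str.startswith l pre)).foldl PySem.Set.add [] := by
    rw [PySem.List.dedup]
    induction ls using List.reverseRecOn with
    | nil => rfl
    | append_singleton xs x ih =>
      rw [List.filter_append, List.filter_singleton]
      by_cases hx : PySem.Str.startswith x pre = true
      · simp only [hx, cond_true]
        rw [PySem.Set.ofList_append_singleton, List.foldl_append, List.foldl_cons, List.foldl_nil, ih]
      · simp only [hx, cond_false, List.append_nil]
        exact ih
  rw [h1, List.foldl_filter]
  apply PySem.List.foldl_congr_mem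
  intro acc l _
  unfold pvSel
  by_cases hs : PySem.Str.startswith l pre = true
  · simp only [hs, if_pos, Bool.true_and, PySem.Set.add_eq_ite]
    by_cases hc : l ∈ acc
    · simp [hc]
    · simp [hc]
  · have hs2 : PySem.Chars.startswith l.toList pre.toList = false := by
      simpa [PySem.Str.startswith] using hs
    simp [hs2]

lemma pv_comp_items (xs : List String) (tag : String) (hnd : xs.Nodup) :
    (pvComp xs tag).items
      = (PySem.List.enumerate xs 1).map (fun p => (p.2, tag ++ PySem.Int.toStr p.1)) := by
  unfold pvComp
  rw [PySem.Dict.items_foldl_insert_fresh (PySem.List.enumerate xs 1)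
      (fun p => p.2) (fun p => tag ++ PySem.Int.toStr p.1) PySem.Dict.empty
      (fun a _ => by simp [PySem.Dict.contains_empty])
      (by rw [PySem.List.map_snd_enumerate]; exact hnd)]
  rfl

lemma pv_update_comp (m : PySem.Dict String String) (xs : List String) (tag : String)
    (hnd : xs.Nodup) :
    m.update (pvComp xs tag).items
      = (PySem.List.enumerate xs 1).foldl (fun m p => m.insert p.2 (tag ++ PySem.Int.toStr p.1)) m := by
  rw [PySem.Dict.update, pv_comp_items xs tag hnd, List.foldl_map]

lemma pv_update_dedup (m : PySem.Dict String String) (ls : List String) (tag : String) :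
    m.update (pvComp (PySem.List.dedup ls) tag).items
      = (PySem.List.enumerate (PySem.List.dedup ls) 1).foldl
          (fun m p => m.insert p.2 (tag ++ PySem.Int.toStr p.1)) m :=
  pv_update_comp m _ tag (PySem.List.nodup_dedup ls)

-- ===== VERDICT (by name: the statement is the Claim_ definition above) =====
theorem discover_locks_spec : Claim_equal_discover_locks := by
  intro merged _
  unfold Spec_discover_locks discover_locks discover_locks_alt
  rw [pv_nested_fold merged ([], [], []), pv_fold_componentwise (pvLocks merged) [] [] []]
  simp only [pv_sel_eq_dedup, pvUniq, pv_update_dedup]
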